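-- pv_equiv track=rewrite | github.com/mooooondh/Programmers | stack_04/stack_04.py | sort_print
-- ===== SOURCE A (Python) =====
-- def sort_print(ready):
--     check= False
--
--     while(check== False):
--         pop_data= ready[0]
--         check= True
--
--         for i in ready:
--             if(pop_data[0]< i[0]):
--                 pop_data= ready.pop(0)
--                 ready.append(pop_data)
--                 check= False
--                 break
--     return ready
-- ===== SOURCE B (Python) =====
-- def sort_print(ready):
--     m = max(row[0] for row in ready)
--     k = next(j for j, row in enumerate(ready) if row[0] == m)
--     ready[:] = ready[k:] + ready[:k]
--     return ready
-- ===== Notes on version B (the rewrite author's own statement) =====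
-- stated objective: simpler
-- what changed: Replace the repeated rotate-by-one while-loop (each step rescanning the list for an element beating the front) with one scan for the first index of the maximal first element followed by a single slice rotation.
-- outside the precondition, e.g. on sort_print([]): A raises IndexError, B raises ValueError; on sort_print([[1], []]): A raises IndexError, B raises IndexError
import Mathlib
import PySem

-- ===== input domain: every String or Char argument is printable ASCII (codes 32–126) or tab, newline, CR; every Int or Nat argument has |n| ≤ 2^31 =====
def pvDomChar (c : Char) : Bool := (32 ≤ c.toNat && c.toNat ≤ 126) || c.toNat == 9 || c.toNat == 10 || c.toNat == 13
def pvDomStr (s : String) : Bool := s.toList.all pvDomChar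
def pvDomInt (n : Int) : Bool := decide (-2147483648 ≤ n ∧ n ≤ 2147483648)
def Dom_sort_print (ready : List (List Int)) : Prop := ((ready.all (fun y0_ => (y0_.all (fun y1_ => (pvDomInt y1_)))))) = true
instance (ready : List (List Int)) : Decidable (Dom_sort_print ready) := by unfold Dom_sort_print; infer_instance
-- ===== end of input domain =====

-- B computes the first index of the maximal first element in one scan and rotates once by
-- slicing, instead of A's rotate-by-one while-loop that rescans the list each step: simpler.
-- Both Pythons mutate `ready` in place to the same final contents; the theorems are about the
-- return value.

-- ===== PORT A =====
-- row[0] as both Pythons read it (IndexError on an empty row is excluded by Pre_)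
def pvFst0 (row : List Int) : Int := (PySem.List.pyGet? row 0).getD 0

-- the while-loop of A: rotate front to back while some element's first item beats the front's;
-- fuel = |ready| suffices on Pre_ (the loop performs at most |ready| - 1 rotations)
def sortLoopA : List (List Int) → Nat → List (List Int)
  | ready, 0 => ready
  | ready, fuel + 1 =>
    match ready with
    | [] => []
    | pd :: rest =>
      if (pd :: rest).any (fun i => pvFst0 pd < pvFst0 i) then
        sortLoopA (rest ++ [pd]) fuel
      else
        pd :: rest

def sort_print (ready : List (List Int)) : List (List Int) :=
  sortLoopA ready ready.length

-- ===== PORT B =====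
def sort_print_alt (ready : List (List Int)) : List (List Int) :=
  match PySem.List.max? (ready.map pvFst0) (fun x => x) with
  | none => ready
  | some m =>
    ready.drop ((ready.map pvFst0).idxOf m) ++ ready.take ((ready.map pvFst0).idxOf m)

-- ===== PRECONDITION & SPEC =====
-- Pre_ excludes exactly the inputs where A raises IndexError: an empty list (ready[0]) and
-- any empty row (pop_data[0] / i[0]).
def Pre_sort_print (ready : List (List Int)) : Prop :=
  ready ≠ [] ∧ ∀ row ∈ ready, row ≠ []
instance (ready : List (List Int)) : Decidable (Pre_sort_print ready) := by
  unfold Pre_sort_print; infer_instance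
def pvWitness_sort_print : List (List Int) := [[1], [3, 2], [2]]

def Spec_sort_print (ready : List (List Int)) (out : List (List Int)) : Prop := out = sort_print_alt ready
instance (ready : List (List Int)) (out : List (List Int)) : Decidable (Spec_sort_print ready out) := by unfold Spec_sort_print; infer_instance

-- ===== CLAIM (what is proved, stated in full; the proofs are below) =====
def Claim_equal_sort_print : Prop := ∀ (ready : List (List Int)), Dom_sort_print ready → Pre_sort_print ready → Spec_sort_print ready (sort_print ready)

-- ===== LEMMAS AND PROOFS =====

theorem pvMax?_id_eq (l : List Int) (m : Int) (h : PySem.List.max? l (fun x => x) = some m) :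
    m ∈ l ∧ ∀ y ∈ l, y ≤ m := by
  refine ⟨PySem.List.max?_mem h, ?_⟩
  intro y hy
  exact PySem.List.max?_isMax h y hy

theorem pvMax?_id_of (l : List Int) (m : Int) (hm : m ∈ l) (hmax : ∀ y ∈ l, y ≤ m) :
    PySem.List.max? l (fun x => x) = some m := by
  cases hM : PySem.List.max? l (fun x => x) with
  | none =>
    rw [PySem.List.max?_eq_none_iff] at hM
    subst hM; cases hm
  | some m' =>
    obtain ⟨hm', hmax'⟩ := pvMax?_id_eq l m' hM
    have h1 := hmax m' hm'
    have h2 := hmax' m hm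
    rw [le_antisymm h1 h2]

-- the loop computes the single rotation to the first index of the maximal first element
theorem sortLoopA_eq (fuel : Nat) :
    ∀ (l : List (List Int)) (m : Int),
      PySem.List.max? (l.map pvFst0) (fun x => x) = some m →
      (l.map pvFst0).idxOf m ≤ fuel →
      sortLoopA l fuel = l.drop ((l.map pvFst0).idxOf m) ++ l.take ((l.map pvFst0).idxOf m) := by
  induction fuel with
  | zero =>
    intro l m hM hk
    have hk0 : (l.map pvFst0).idxOf m = 0 := Nat.le_zero.mp hk
    simp [sortLoopA, hk0]
  | succ fuel ih =>
    intro l m hM hk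
    obtain ⟨hmem, hmax⟩ := pvMax?_id_eq _ _ hM
    cases l with
    | nil => simp at hmem
    | cons a rest =>
      by_cases hfa : pvFst0 a = m
      · -- front is maximal: the for-loop finds nothing, loop stops; rotation index is 0
        subst hfa
        have hany : (a :: rest).any (fun i => pvFst0 a < pvFst0 i) = false := by
          simp only [List.any_eq_false]
          intro i hi
          have h1 := hmax (pvFst0 i) (List.mem_map_of_mem hi)
          simp only [decide_eq_true_eq]
          omega
        simp [sortLoopA, hany, List.idxOf_cons_self]
      · -- front is beaten: rotate once and recurse
        have hmF : m ∈ rest.map pvFst0 := by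
          rw [List.map_cons, List.mem_cons] at hmem
          rcases hmem with h | h
          · exact absurd h.symm hfa
          · exact h
        have hfalt : pvFst0 a < m := by
          have := hmax (pvFst0 a) (by simp)
          omega
        have hany : (a :: rest).any (fun i => pvFst0 a < pvFst0 i) = true := by
          obtain ⟨i, hi, hfi⟩ := List.mem_map.mp hmF
          simp only [List.any_eq_true]
          exact ⟨i, by simp [hi], by simp [hfi, hfalt]⟩
        have hM' : PySem.List.max? ((rest ++ [a]).map pvFst0) (fun x => x) = some m := by
          refine pvMax?_id_of _ _ ?_ ?_
          · simp only [List.map_append]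
            exact List.mem_append_left _ hmF
          · intro y hy
            simp only [List.map_append, List.mem_append, List.map_cons, List.map_nil,
              List.mem_singleton] at hy
            rcases hy with hy | hy
            · exact hmax y (by simp [hy])
            · subst hy; omega
        have hidx : ((rest ++ [a]).map pvFst0).idxOf m = (rest.map pvFst0).idxOf m := by
          simp only [List.map_append]
          exact List.idxOf_append_of_mem hmF
        have hkc : ((a :: rest).map pvFst0).idxOf m = (rest.map pvFst0).idxOf m + 1 := by
          simp [hfa]
        have hk' : ((rest ++ [a]).map pvFst0).idxOf m ≤ fuel := by
          rw [hidx]; omega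
        have hlt : (rest.map pvFst0).idxOf m < rest.length := by
          have := List.idxOf_lt_length_of_mem hmF
          simpa using this
        have := ih (rest ++ [a]) m hM' hk'
        simp only [sortLoopA, hany]
        rw [this, hidx, hkc]
        rw [List.drop_append_of_le_length (by omega), List.take_append_of_le_length (by omega)]
        simp

-- ===== VERDICT (by name: the statement is the Claim_ definition above) =====
theorem sort_print_spec : Claim_equal_sort_print := by
  intro ready _ hPre
  obtain ⟨hne, _⟩ := hPre
  have hMne : ready.map pvFst0 ≠ [] := by simpa using hne
  cases hM : PySem.List.max? (ready.map pvFst0) (fun x => x) with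
  | none =>
    rw [PySem.List.max?_eq_none_iff] at hM
    exact absurd hM hMne
  | some m =>
    have hmem := (pvMax?_id_eq _ _ hM).1
    have hlt : (ready.map pvFst0).idxOf m < ready.length := by
      have := List.idxOf_lt_length_of_mem hmem
      simpa using this
    unfold Spec_sort_print sort_print sort_print_alt
    rw [hM, sortLoopA_eq ready.length ready m hM (by omega)]
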